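-- pv_equiv track=rewrite | github.com/yidong72/reasoning-gym | reasoning_gym/games/tower_of_hanoi.py | _visualize_state
-- ===== SOURCE A (Python) =====
-- from typing import Any, Dict, List, Optional, Tuple
--
-- def _visualize_state(pegs_state: Dict[int, List[int]]) -> str:
--     """
--     Create an ASCII visualization of the current state of the pegs.
--     Adapts to variable number of pegs.
--
--     Args:
--         pegs_state (dict): Dictionary mapping peg numbers to lists of disks.
--
--     Returns:
--         str: ASCII art representing the pegs and disks.
--     """
--     # Determine the number of levels based on the maximum number of disks on any peg
--     max_height = max(len(disks) for disks in pegs_state.values())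
--     pegs = sorted(pegs_state.keys())
--
--     visualization = ""
--     for level in range(max_height, 0, -1):
--         for peg in pegs:
--             if len(pegs_state[peg]) >= level:
--                 disk_size = pegs_state[peg][level - 1]
--                 disk_str = f"[{'*' * disk_size}]"
--             else:
--                 disk_str = "[ ]"
--             visualization += disk_str.center(7)  # Adjust spacing as needed
--         visualization += "\n"
--
--     # Add the base and peg numbers
--     visualization += "-" * (7 * len(pegs)) + "\n"
--     for peg in pegs:
--         peg_label = f"P{peg}".center(7)
--         visualization += peg_label
--     visualization += "\n"
--
--     return visualization
-- ===== SOURCE B (Python) =====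
-- def _visualize_state(pegs_state):
--     max_height = max(len(disks) for disks in pegs_state.values())
--     pegs = sorted(pegs_state.keys())
--     # build one column (top level first) per peg, then transpose by index;
--     # peg-major order lets each peg's disk list be looked up once
--     cols = []
--     for p in pegs:
--         disks = pegs_state[p]
--         n = len(disks)
--         cols.append([
--             (f"[{'*' * disks[lvl - 1]}]" if n >= lvl else "[ ]").center(7)
--             for lvl in range(max_height, 0, -1)
--         ])
--     body = "".join("".join([col[i] for col in cols]) + "\n" for i in range(max_height))
--     labels = "".join(f"P{p}".center(7) for p in pegs)
--     return body + "-" * (7 * len(pegs)) + "\n" + labels + "\n"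
-- ===== Notes on version B (the rewrite author's own statement) =====
-- stated objective: alternative
-- what changed: B builds one column of cells per peg (peg-major, with the peg's disk list looked up once) and transposes by index into rows joined at once, instead of A's row-major nested loops accumulating into one growing string.
import Mathlib
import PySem

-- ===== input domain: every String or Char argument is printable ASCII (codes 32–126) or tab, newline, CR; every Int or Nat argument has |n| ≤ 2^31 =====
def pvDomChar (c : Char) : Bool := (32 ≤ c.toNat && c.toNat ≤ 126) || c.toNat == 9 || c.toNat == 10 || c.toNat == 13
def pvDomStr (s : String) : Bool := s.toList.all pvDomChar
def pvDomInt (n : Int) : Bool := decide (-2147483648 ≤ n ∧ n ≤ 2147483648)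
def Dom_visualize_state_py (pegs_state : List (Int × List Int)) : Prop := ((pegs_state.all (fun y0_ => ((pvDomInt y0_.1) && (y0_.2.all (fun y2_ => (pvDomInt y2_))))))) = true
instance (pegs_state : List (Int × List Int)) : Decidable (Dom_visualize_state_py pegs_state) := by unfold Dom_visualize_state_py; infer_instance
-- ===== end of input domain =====

-- B rebuilds the picture peg-major (one column of cells per peg, then an index transpose into rows)
-- where A accumulates it row-major with two nested loops; return values proved equal on non-empty dicts.

-- ===== PORT A =====
-- hand-port of str.center(7) (no PySem primitive): exact CPython rule — for width 7 (odd)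
-- the left margin is marg//2 + marg%2; both Pythons call .center(7) on these very cells.
def pvCenter7 (cs : List Char) : List Char :=
  let m : Int := 7 - (cs.length : Int)
  if m ≤ 0 then cs
  else List.replicate ((m + 1) / 2).toNat ' ' ++ cs ++ List.replicate (m.toNat - ((m + 1) / 2).toNat) ' '

-- one cell from a disk list and its length:
-- ("[" + "*"*disks[lvl-1] + "]" if n >= lvl else "[ ]").center(7)
-- ("*" * n on a negative n is "" in Python; Int.toNat clamps to 0, exact)
def pvCellOf (disks : List Int) (n : Nat) (lvl : Int) : List Char :=
  pvCenter7 (if lvl ≤ (n : Int) then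
      '[' :: (List.replicate (PySem.List.pyGetD disks (lvl - 1) 0).toNat '*' ++ [']'])
    else "[ ]".toList)

-- A's inline cell: both lookups pegs_state[peg] done on the spot
def pvCell (d : PySem.Dict Int (List Int)) (p lvl : Int) : List Char :=
  pvCellOf (d.getD p []) (d.getD p []).length lvl

-- f"P{peg}".center(7), shared verbatim by both Pythons
def pvLabel (p : Int) : List Char := pvCenter7 ('P' :: PySem.Int.toChars p)

def visualize_state_py (pegs_state : List (Int × List Int)) : String :=
  let d := PySem.Dict.ofList pegs_state
  -- max(len(disks) for disks in pegs_state.values()); ValueError on the empty dict is excluded by Pre_, the .getD 0 is unreachable there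
  let max_height := (PySem.List.max? (d.values.map (fun v => (v.length : Int))) (fun x => x)).getD 0
  let pegs := PySem.List.sorted d.keys (fun x => x) false
  let vis := (PySem.List.pyRange max_height 0 (-1)).foldl
      (fun acc lvl => (pegs.foldl (fun acc2 p => acc2 ++ pvCell d p lvl) acc) ++ ['\n']) []
  let vis := vis ++ List.replicate (7 * pegs.length) '-' ++ ['\n']
  let vis := pegs.foldl (fun acc p => acc ++ pvLabel p) vis
  String.ofList (vis ++ ['\n'])

-- ===== PORT B =====
def visualize_state_py_alt (pegs_state : List (Int × List Int)) : String :=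
  let d := PySem.Dict.ofList pegs_state
  let max_height := (PySem.List.max? (d.values.map (fun v => (v.length : Int))) (fun x => x)).getD 0
  let pegs := PySem.List.sorted d.keys (fun x => x) false
  -- cols: one column of cells per peg, top level first; each peg's disk list is looked up once
  let cols := pegs.foldl (fun cs p =>
      let disks := d.getD p []
      let n := disks.length
      cs ++ [(PySem.List.pyRange max_height 0 (-1)).map (fun lvl => pvCellOf disks n lvl)]) []
  -- transpose by index: "".join("".join(col[i] for col in cols) + "\n" for i in range(max_height));
  -- col[i] is always in range, pyGetD's default [] is unreachable
  let body := ((PySem.List.pyRange 0 max_height 1).map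
      (fun i => (cols.map (fun col => PySem.List.pyGetD col i [])).flatten ++ ['\n'])).flatten
  let labels := (pegs.map pvLabel).flatten
  String.ofList (body ++ (List.replicate (7 * pegs.length) '-' ++ ('\n' :: (labels ++ ['\n']))))

-- ===== PRECONDITION & SPEC =====
-- the empty dict is excluded: there max() of an empty generator raises ValueError in A (and in B)
def Pre_visualize_state_py (pegs_state : List (Int × List Int)) : Prop := pegs_state ≠ []
instance (pegs_state : List (Int × List Int)) : Decidable (Pre_visualize_state_py pegs_state) := by unfold Pre_visualize_state_py; infer_instance
def pvWitness_visualize_state_py : (List (Int × List Int)) := ([(1, [3, 1]), (2, []), (3, [2])])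

def Spec_visualize_state_py (pegs_state : List (Int × List Int)) (out : String) : Prop := out = visualize_state_py_alt pegs_state
instance (pegs_state : List (Int × List Int)) (out : String) : Decidable (Spec_visualize_state_py pegs_state out) := by unfold Spec_visualize_state_py; infer_instance

-- ===== CLAIM (what is proved, stated in full; the proofs are below) =====
def Claim_equal_visualize_state_py : Prop := ∀ (pegs_state : List (Int × List Int)), Dom_visualize_state_py pegs_state → Pre_visualize_state_py pegs_state → Spec_visualize_state_py pegs_state (visualize_state_py pegs_state)

-- ===== LEMMAS AND PROOFS =====

-- A's two nested appending loops, flattened: rows are flatMaps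
theorem pv_rows_foldl (d : PySem.Dict Int (List Int)) (pegs : List Int) :
    ∀ (lvls : List Int) (acc : List Char),
      lvls.foldl (fun acc lvl => (pegs.foldl (fun acc2 p => acc2 ++ pvCell d p lvl) acc) ++ ['\n']) acc
        = acc ++ lvls.flatMap (fun lvl => pegs.flatMap (fun p => pvCell d p lvl) ++ ['\n']) := by
  intro lvls
  induction lvls with
  | nil => simp
  | cons l t ih =>
    intro acc
    simp only [List.foldl_cons, ih, List.flatMap_cons]
    rw [PySem.List.foldl_append_eq_flatMap]
    simp

theorem pv_body_eq (d : PySem.Dict Int (List Int)) (pegs : List Int) (mh : Int) :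
    (PySem.List.pyRange mh 0 (-1)).flatMap (fun lvl => pegs.flatMap (fun p => pvCell d p lvl) ++ ['\n'])
      = ((PySem.List.pyRange 0 mh 1).map
          (fun i => ((pegs.map (fun p => (PySem.List.pyRange mh 0 (-1)).map (fun lvl => pvCell d p lvl))).map
              (fun col => PySem.List.pyGetD col i [])).flatten ++ ['\n'])).flatten := by
  rw [List.flatMap_def]
  congr 1
  rw [PySem.List.pyRange_neg_one, PySem.List.pyRange_one]
  simp only [List.map_map, Int.sub_zero]
  apply List.map_congr_left
  intro k hk
  rw [List.mem_range] at hk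
  simp only [Function.comp]
  congr 1
  rw [List.flatMap_def]
  congr 1
  apply List.map_congr_left
  intro p _
  simp only [Function.comp, zero_add, PySem.List.pyGetD_natCast]
  rw [List.getD_eq_getElem _ _ (by simpa using hk)]
  simp

-- ===== VERDICT (by name: the statement is the Claim_ definition above) =====
theorem visualize_state_py_spec : Claim_equal_visualize_state_py := by
  intro ps _ _
  unfold Spec_visualize_state_py visualize_state_py visualize_state_py_alt
  dsimp only
  rw [PySem.List.foldl_append_singleton_eq_map]
  congr 1
  rw [pv_rows_foldl, PySem.List.foldl_append_eq_flatMap, pv_body_eq]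
  simp [pvCell, List.flatMap_def, List.append_assoc]
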